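-- pv_equiv track=rewrite | github.com/tonyp7/brainteasers | langue_de_feu/langue_de_feu.py | translate_shorter
-- ===== SOURCE A (Python) =====
-- def translate_shorter(text):
--     vowels = ['a', 'e', 'i', 'o', 'u']
--     l = len(text)
--     output = ''
--
--     for i in range(0, l):
--         if text[i] in vowels and not(i > 0 and (text[i-1] in vowels)):
--             output += 'av' + text[i]
--         else:
--             output += text[i]
--
--     return output
-- ===== SOURCE B (Python) =====
-- def translate_shorter(text):
--     vowels = set('aeiou')
--     parts = []
--     i, n = 0, len(text)
--     while i < n:
--         isv = text[i] in vowels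
--         j = i + 1
--         while j < n and (text[j] in vowels) == isv:
--             j += 1
--         parts.append(('av' + text[i:j]) if isv else text[i:j])
--         i = j
--     return ''.join(parts)
-- ===== Notes on version B (the rewrite author's own statement) =====
-- stated objective: alternative
-- what changed: B replaces the per-index lookback test on the previous character with a two-pointer scanner that slices the text into maximal runs of equal vowelness and prepends the marker once per vowel run.
import Mathlib
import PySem

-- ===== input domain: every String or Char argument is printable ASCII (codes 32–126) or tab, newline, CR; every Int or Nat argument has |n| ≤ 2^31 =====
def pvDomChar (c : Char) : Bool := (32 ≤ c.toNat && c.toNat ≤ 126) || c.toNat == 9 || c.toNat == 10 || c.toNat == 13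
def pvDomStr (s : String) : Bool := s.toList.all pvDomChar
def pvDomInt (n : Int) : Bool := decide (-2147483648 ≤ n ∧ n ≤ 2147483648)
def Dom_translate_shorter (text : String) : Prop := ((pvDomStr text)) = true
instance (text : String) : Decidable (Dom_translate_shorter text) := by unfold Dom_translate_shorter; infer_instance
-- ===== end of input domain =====

-- B replaces A's per-index lookback test with a two-pointer scan over maximal runs of
-- same vowelness, prepending 'av' once per vowel run (alternative decomposition, same cost).

-- membership test `c in vowels` / `c in set('aeiou')` (same character test in both programs)
def pvVowel (c : Char) : Bool := (['a', 'e', 'i', 'o', 'u'] : List Char).contains c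

-- ===== PORT A =====
def translate_shorter (text : String) : String :=
  let cs := text.toList
  let l := cs.length
  let out := (List.range l).foldl (fun (acc : List Char) i =>
    if pvVowel (cs.getD i ' ') && !(decide (i > 0) && pvVowel (cs.getD (i - 1) ' ')) then
      acc ++ ('a' :: 'v' :: [cs.getD i ' '])
    else
      acc ++ [cs.getD i ' ']) ([] : List Char)
  String.ofList out

-- ===== PORT B =====
-- the two nested while loops of Source B: outer = one step per run, inner (j) = takeWhile/dropWhile
def pvRunsB : List Char → List (Bool × List Char)
  | [] => []
  | c :: rest =>
    let isv := pvVowel c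
    let run := rest.takeWhile (fun d => pvVowel d == isv)
    let rest' := rest.dropWhile (fun d => pvVowel d == isv)
    (isv, c :: run) :: pvRunsB rest'
termination_by l => l.length
decreasing_by
  exact Nat.lt_succ_of_le (List.length_dropWhile_le _ _)

def translate_shorter_alt (text : String) : String :=
  let parts := (pvRunsB text.toList).map (fun r => if r.1 then 'a' :: 'v' :: r.2 else r.2)
  String.ofList parts.flatten

-- ===== PRECONDITION & SPEC =====
def Spec_translate_shorter (text : String) (out : String) : Prop := out = translate_shorter_alt text
instance (text : String) (out : String) : Decidable (Spec_translate_shorter text out) := by unfold Spec_translate_shorter; infer_instance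

-- ===== CLAIM (what is proved, stated in full; the proofs are below) =====
def Claim_equal_translate_shorter : Prop := ∀ (text : String), Dom_translate_shorter text → Spec_translate_shorter text (translate_shorter text)

-- ===== LEMMAS AND PROOFS =====

-- reference recursion: prev = "previous character exists and is a vowel"
def pvGo : Bool → List Char → List Char
  | _, [] => []
  | prev, c :: cs =>
    (if pvVowel c && !prev then 'a' :: 'v' :: [c] else [c]) ++ pvGo (pvVowel c) cs

-- A's emitted chunk at index i, as a function of the (prev-vowelness, current char) pair
def pvEmit (bc : Bool × Char) : List Char :=
  if pvVowel bc.2 && !bc.1 then 'a' :: 'v' :: [bc.2] else [bc.2]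

lemma pvA_pairs (cs : List Char) :
    (List.range cs.length).map
        (fun i => ((decide (i > 0) && pvVowel (cs.getD (i - 1) ' ')), cs.getD i ' '))
      = ((' ' :: cs).zip cs).map (fun pc => (pvVowel pc.1, pc.2)) := by
  apply List.ext_getElem
  · simp
  · intro i h1 h2
    simp only [List.length_map, List.length_range] at h1
    simp only [List.getElem_map, List.getElem_range, List.getElem_zip,
      List.getD_eq_getElem?_getD, List.getElem?_eq_getElem h1]
    cases i with
    | zero => simp [pvVowel]
    | succ k =>
      have hk : k < cs.length := Nat.lt_of_succ_lt h1
      simp [List.getElem?_eq_getElem hk]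

lemma pvZip_go (cs : List Char) : ∀ p : Char,
    (((p :: cs).zip cs).map (fun pc => (pvVowel pc.1, pc.2))).flatMap pvEmit
      = pvGo (pvVowel p) cs := by
  induction cs with
  | nil => intro p; rfl
  | cons c t ih =>
    intro p
    simp only [List.zip_cons_cons, List.map_cons, List.flatMap_cons, ih c, pvGo, pvEmit]

lemma pvA_go (cs : List Char) :
    (List.range cs.length).foldl (fun (acc : List Char) i =>
        if pvVowel (cs.getD i ' ') && !(decide (i > 0) && pvVowel (cs.getD (i - 1) ' ')) then
          acc ++ ('a' :: 'v' :: [cs.getD i ' '])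
        else
          acc ++ [cs.getD i ' ']) ([] : List Char)
      = pvGo false cs := by
  have hfun : (fun (acc : List Char) i =>
      if pvVowel (cs.getD i ' ') && !(decide (i > 0) && pvVowel (cs.getD (i - 1) ' ')) then
        acc ++ ('a' :: 'v' :: [cs.getD i ' '])
      else
        acc ++ [cs.getD i ' '])
      = (fun (acc : List Char) i => acc ++
          pvEmit ((decide (i > 0) && pvVowel (cs.getD (i - 1) ' ')), cs.getD i ' ')) := by
    funext acc i
    simp only [pvEmit]
    split <;> rfl
  rw [hfun, PySem.List.foldl_append_eq_flatMap, List.nil_append]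
  have : (List.range cs.length).flatMap
      (fun i => pvEmit ((decide (i > 0) && pvVowel (cs.getD (i - 1) ' ')), cs.getD i ' '))
      = ((List.range cs.length).map
          (fun i => ((decide (i > 0) && pvVowel (cs.getD (i - 1) ' ')), cs.getD i ' '))).flatMap pvEmit := by
    rw [List.flatMap_map]
  rw [this, pvA_pairs]
  have h := pvZip_go cs ' '
  simpa [pvVowel] using h

lemma pvGo_run (isv : Bool) : ∀ (run rest : List Char),
    (∀ d ∈ run, pvVowel d = isv) → pvGo isv (run ++ rest) = run ++ pvGo isv rest := by
  intro run
  induction run with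
  | nil => intro rest _; simp
  | cons d t ih =>
    intro rest h
    have hd : pvVowel d = isv := h d List.mem_cons_self
    have ht := ih rest (fun x hx => h x (List.mem_cons_of_mem _ hx))
    simp only [List.cons_append, pvGo, hd, Bool.and_not_self, Bool.false_eq_true, if_false, ht, List.nil_append]

lemma pvB_go : ∀ n (cs : List Char), cs.length ≤ n → ∀ (prev : Bool),
    (prev = true → ∀ c ∈ cs.head?, pvVowel c = false) →
    ((pvRunsB cs).map (fun r => if r.1 then 'a' :: 'v' :: r.2 else r.2)).flatten
      = pvGo prev cs := by
  intro n
  induction n with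
  | zero =>
    intro cs hlen prev _
    rw [List.length_eq_zero_iff.mp (Nat.le_zero.mp hlen)]
    simp [pvRunsB, pvGo]
  | succ m ih =>
    intro cs hlen prev hprev
    cases cs with
    | nil => simp [pvRunsB, pvGo]
    | cons c rest =>
      have hsplit : rest.takeWhile (fun d => pvVowel d == pvVowel c)
          ++ rest.dropWhile (fun d => pvVowel d == pvVowel c) = rest :=
        List.takeWhile_append_dropWhile
      have hhead : (pvVowel c && !prev) = pvVowel c := by
        cases hp : prev
        · simp
        · have := hprev hp c (by simp)
          simp [this]
      have hmem : ∀ d ∈ rest.takeWhile (fun d => pvVowel d == pvVowel c),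
          pvVowel d = pvVowel c := fun d hd => by simpa using List.mem_takeWhile_imp hd
      have hrec : ((pvRunsB (rest.dropWhile (fun d => pvVowel d == pvVowel c))).map
            (fun r => if r.1 then 'a' :: 'v' :: r.2 else r.2)).flatten
          = pvGo (pvVowel c) (rest.dropWhile (fun d => pvVowel d == pvVowel c)) := by
        apply ih
        · exact le_trans (List.length_dropWhile_le _ _) (Nat.le_of_succ_le_succ hlen)
        · intro hisv' d hd
          have h := List.head?_dropWhile_not (fun d => pvVowel d == pvVowel c) rest
          cases hh : (rest.dropWhile (fun d => pvVowel d == pvVowel c)).head? with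
          | none => simp [hh] at hd
          | some x =>
            rw [hh] at h
            simp only [hh, Option.mem_some_iff] at hd
            subst hd
            simp only [beq_eq_false_iff_ne, ne_eq, hisv'] at h
            exact Bool.not_eq_true _ |>.mp h
      rw [pvRunsB]
      simp only [List.map_cons, List.flatten_cons, hrec]
      conv_rhs => rw [pvGo, ← hsplit]
      rw [pvGo_run _ _ _ hmem, hhead]
      cases pvVowel c <;> simp

-- ===== VERDICT (by name: the statement is the Claim_ definition above) =====
theorem translate_shorter_spec : Claim_equal_translate_shorter := by
  intro text _
  unfold Spec_translate_shorter translate_shorter translate_shorter_alt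
  simp only
  rw [pvA_go]
  rw [pvB_go text.toList.length text.toList le_rfl false (by intro h; cases h)]
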